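-- pv_equiv track=rewrite | github.com/vsharma2430/TaskBoard | server_app/misc.py | join_strings_starting_with_and
-- ===== SOURCE A (Python) =====
-- def join_strings_starting_with_and(strings:list[str]) -> list[str]:
--     modified_strings = []
--     for string in strings:
--         if string.startswith('&&'):
--             if modified_strings:
--                 modified_strings[-1] += string[2:]
--         else:
--             modified_strings.append(string)
--     return modified_strings
-- ===== SOURCE B (Python) =====
-- def join_strings_starting_with_and(strings: list[str]) -> list[str]:
--     # Run-scanner: skip unattached leading '&&' items, then repeatedly take one
--     # head together with its maximal run of following '&&' items and emit the
--     # joined run, jumping index-wise from run start to run start.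
--     n = len(strings)
--     i = 0
--     while i < n and strings[i].startswith('&&'):
--         i += 1
--     out = []
--     while i < n:
--         j = i + 1
--         while j < n and strings[j].startswith('&&'):
--             j += 1
--         out.append(strings[i] + ''.join(s[2:] for s in strings[i + 1:j]))
--         i = j
--     return out
-- ===== Notes on version B (the rewrite author's own statement) =====
-- stated objective: alternative
-- what changed: B is a run-scanner: it skips unattached leading '&&' items, then repeatedly locates the maximal run [i, j) consisting of a head plus its following '&&' items and emits the whole run joined at once, jumping from run start to run start, instead of A's single fold that mutates the last element of the growing result on every '&&' item.
import Mathlib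
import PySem

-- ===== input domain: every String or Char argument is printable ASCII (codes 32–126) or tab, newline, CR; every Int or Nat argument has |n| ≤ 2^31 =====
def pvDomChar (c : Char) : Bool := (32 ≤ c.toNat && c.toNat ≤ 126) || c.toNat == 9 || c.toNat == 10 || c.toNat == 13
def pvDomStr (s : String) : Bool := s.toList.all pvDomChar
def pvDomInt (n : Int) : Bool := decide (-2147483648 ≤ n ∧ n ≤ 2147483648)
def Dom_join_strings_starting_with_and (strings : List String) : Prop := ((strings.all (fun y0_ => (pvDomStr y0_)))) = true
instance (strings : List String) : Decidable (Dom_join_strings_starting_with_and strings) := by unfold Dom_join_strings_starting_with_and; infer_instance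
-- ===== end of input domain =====

-- B is a run-scanner: skip unattached leading '&&' items, then repeatedly take one head with its
-- maximal run of following '&&' items and emit the run joined at once (objective: alternative).

-- ===== PORT A =====
-- one loop iteration of A: concatenate onto the last element on '&&', else append
def joinAndStepA (acc : List String) (s : String) : List String :=
  if PySem.Str.startswith s "&&" then
    if acc.isEmpty then acc
    else acc.dropLast ++ [PySem.List.pyGetD acc (-1) "" ++ PySem.Str.slice s (some 2) none]
  else acc ++ [s]

def join_strings_starting_with_and (strings : List String) : List String :=
  strings.foldl joinAndStepA []

-- ===== PORT B =====
-- Source B's 'continuation' test: s.startswith('&&')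
def joinAndCont (s : String) : Bool := PySem.Str.startswith s "&&"

-- Source B's outer while loop: each iteration takes the head and its maximal run of '&&' items
-- (the inner 'while j < n and strings[j].startswith(...)' counting loop = takeWhile/dropWhile span)
-- and emits strings[i] + ''.join(s[2:] for s in strings[i+1:j]).
def joinAndRuns : List String → List String
  | [] => []
  | h :: t =>
    (h ++ PySem.Str.join "" ((t.takeWhile joinAndCont).map
        (fun s => PySem.Str.slice s (some 2) none)))
      :: joinAndRuns (t.dropWhile joinAndCont)
termination_by l => l.length
decreasing_by
  exact Nat.lt_succ_of_le (List.length_dropWhile_le _ _)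

-- Source B's leading while loop skipping unattached '&&' items, then the run loop
def join_strings_starting_with_and_alt (strings : List String) : List String :=
  joinAndRuns (strings.dropWhile joinAndCont)

-- ===== PRECONDITION & SPEC =====
def Spec_join_strings_starting_with_and (strings : List String) (out : List String) : Prop := out = join_strings_starting_with_and_alt strings
instance (strings : List String) (out : List String) : Decidable (Spec_join_strings_starting_with_and strings out) := by unfold Spec_join_strings_starting_with_and; infer_instance

-- ===== CLAIM (what is proved, stated in full; the proofs are below) =====
def Claim_equal_join_strings_starting_with_and : Prop := ∀ (strings : List String), Dom_join_strings_starting_with_and strings → Spec_join_strings_starting_with_and strings (join_strings_starting_with_and strings)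

-- ===== LEMMAS AND PROOFS =====

theorem joinAndRuns_nil : joinAndRuns [] = [] := by rw [joinAndRuns.eq_def]

theorem joinAndRuns_cons (h : String) (t : List String) :
    joinAndRuns (h :: t)
      = (h ++ PySem.Str.join "" ((t.takeWhile joinAndCont).map
          (fun s => PySem.Str.slice s (some 2) none)))
        :: joinAndRuns (t.dropWhile joinAndCont) := by
  rw [joinAndRuns.eq_def]

theorem join_empty_nil : PySem.Str.join "" ([] : List String) = "" := by
  rw [← String.toList_inj]; simp [PySem.Str.toList_join, PySem.Chars.join_nil]

theorem chars_join_nil_cons (c : List Char) (css : List (List Char)) :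
    PySem.Chars.join [] (c :: css) = c ++ PySem.Chars.join [] css := by
  cases css with
  | nil => simp [PySem.Chars.join_singleton, PySem.Chars.join_nil]
  | cons d rest => rw [PySem.Chars.join_cons_cons]; simp

-- ''.join(a :: parts) = a ++ ''.join(parts)
theorem join_empty_cons (a : String) (g : List String) :
    PySem.Str.join "" (a :: g) = a ++ PySem.Str.join "" g := by
  rw [← String.toList_inj]
  simp only [PySem.Str.toList_join, String.toList_append, List.map_cons]
  exact chars_join_nil_cons a.toList (g.map String.toList)

-- absorbing one '&&' tail into the head commutes with joinAndRuns
theorem joinAndRuns_absorb (x s : String) (t : List String) (hs : joinAndCont s = true) :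
    joinAndRuns (x :: s :: t)
      = joinAndRuns ((x ++ PySem.Str.slice s (some 2) none) :: t) := by
  rw [joinAndRuns_cons, joinAndRuns_cons]
  rw [List.takeWhile_cons_of_pos hs, List.dropWhile_cons_of_pos hs]
  simp [join_empty_cons, String.append_assoc]

-- a non-'&&' head just passes through
theorem joinAndRuns_cons_neg (x s : String) (t : List String) (hs : joinAndCont s = false) :
    joinAndRuns (x :: s :: t) = x :: joinAndRuns (s :: t) := by
  have hs2 : ¬ joinAndCont s = true := by simp [hs]
  rw [joinAndRuns_cons x (s :: t)]
  rw [List.takeWhile_cons_of_neg hs2, List.dropWhile_cons_of_neg hs2]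
  rw [List.map_nil, join_empty_nil]
  simp

-- invariant of A's fold: with a nonempty accumulator pre ++ [x], the fold produces
-- pre followed by the runs of x :: l
theorem foldA_invariant (l : List String) (pre : List String) (x : String) :
    l.foldl joinAndStepA (pre ++ [x]) = pre ++ joinAndRuns (x :: l) := by
  induction l generalizing pre x with
  | nil =>
    rw [List.foldl_nil, joinAndRuns_cons, List.takeWhile_nil, List.dropWhile_nil,
      List.map_nil, join_empty_nil, joinAndRuns_nil]
    simp
  | cons s t ih =>
    rw [List.foldl_cons]
    by_cases hs : joinAndCont s = true
    · have hs2 : PySem.Str.startswith s "&&" = true := hs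
      have hstep : joinAndStepA (pre ++ [x]) s
          = pre ++ [x ++ PySem.Str.slice s (some 2) none] := by
        unfold joinAndStepA
        rw [if_pos hs2, if_neg (by simp)]
        simp [PySem.List.pyGetD_neg_one_append_singleton]
      rw [hstep, ih, joinAndRuns_absorb x s t hs]
    · have hs' : PySem.Str.startswith s "&&" = false := by simpa [joinAndCont] using hs
      have hstep : joinAndStepA (pre ++ [x]) s = (pre ++ [x]) ++ [s] := by
        unfold joinAndStepA
        rw [if_neg (by rw [hs']; simp)]
      rw [hstep, ih (pre ++ [x]) s, joinAndRuns_cons_neg x s t (by simpa [joinAndCont] using hs)]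
      simp

-- A's fold from the empty accumulator equals B's run scan after dropping the leading '&&' items
theorem foldA_eq_runs (l : List String) :
    l.foldl joinAndStepA [] = joinAndRuns (l.dropWhile joinAndCont) := by
  induction l with
  | nil => rw [List.foldl_nil, List.dropWhile_nil, joinAndRuns_nil]
  | cons s t ih =>
    by_cases hs : joinAndCont s = true
    · have hs2 : PySem.Str.startswith s "&&" = true := hs
      have hstep : joinAndStepA [] s = [] := by
        unfold joinAndStepA
        rw [if_pos hs2, if_pos (by simp)]
      rw [List.foldl_cons, hstep, ih, List.dropWhile_cons_of_pos hs]
    · have hs' : PySem.Str.startswith s "&&" = false := by simpa [joinAndCont] using hs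
      rw [List.foldl_cons, List.dropWhile_cons_of_neg hs]
      have hstep : joinAndStepA [] s = [] ++ [s] := by
        unfold joinAndStepA
        rw [if_neg (by rw [hs']; simp)]
      rw [hstep, foldA_invariant t [] s]
      simp

-- ===== VERDICT (by name: the statement is the Claim_ definition above) =====
theorem join_strings_starting_with_and_spec : Claim_equal_join_strings_starting_with_and := by
  intro strings _
  unfold Spec_join_strings_starting_with_and join_strings_starting_with_and join_strings_starting_with_and_alt
  exact foldA_eq_runs strings
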